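-- pv_equiv track=rewrite | github.com/moncey10/University_erp_system | panels.py | validate_course_name_input
-- ===== SOURCE A (Python) =====
-- def validate_course_name_input(P):
--     if P == "":
--         return True
--     allowed_symbols = set("-:_ ")
--     has_letter = False
--     for ch in P:
--         if ch.isalpha():
--             has_letter = True
--         elif ch.isdigit() or ch in allowed_symbols:
--             pass
--         else:
--             return False
--     return has_letter
-- ===== SOURCE B (Python) =====
-- LETTERS = set("abcdefghijklmnopqrstuvwxyzABCDEFGHIJKLMNOPQRSTUVWXYZ")
-- VALID_CHARS = LETTERS | set("0123456789-:_ ")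
--
--
-- def validate_course_name_input(P):
--     distinct = set(P)
--     return distinct <= VALID_CHARS and (P == "" or not distinct.isdisjoint(LETTERS))
-- ===== Notes on version B (the rewrite author's own statement) =====
-- stated objective: faster
-- what changed: Replaces the fused per-character loop with a has_letter flag and early return by set algebra over the distinct characters: a subset test against a precomputed valid-character set plus a non-disjointness test against the letter set.
import Mathlib
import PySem

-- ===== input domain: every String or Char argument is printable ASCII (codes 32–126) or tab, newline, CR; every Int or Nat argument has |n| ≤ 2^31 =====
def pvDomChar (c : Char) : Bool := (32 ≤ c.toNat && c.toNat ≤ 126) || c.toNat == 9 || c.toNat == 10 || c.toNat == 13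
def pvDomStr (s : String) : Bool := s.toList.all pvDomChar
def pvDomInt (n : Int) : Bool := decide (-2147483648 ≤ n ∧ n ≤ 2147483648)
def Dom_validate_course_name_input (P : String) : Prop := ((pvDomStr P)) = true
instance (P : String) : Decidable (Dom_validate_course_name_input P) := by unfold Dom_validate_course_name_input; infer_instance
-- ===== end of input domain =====

-- B decides validity by set algebra over the distinct characters (subset of a
-- precomputed valid-char set, non-disjoint with the letter set) instead of A's
-- fused per-character loop with a has_letter flag (alternative formulation).


-- ===== PORT A =====
-- allowed_symbols = set("-:_ ")
def pvAllowedA : PySem.Set Char := PySem.Set.ofList ['-', ':', '_', ' ']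

-- the for-loop: early return False, otherwise the has_letter flag threads through
def pvLoopA : List Char → Bool → Bool
  | [], has_letter => has_letter
  | ch :: rest, has_letter =>
    if PySem.Str.isalpha ch then pvLoopA rest true
    else if PySem.Str.isdigit ch || PySem.Set.contains pvAllowedA ch then pvLoopA rest has_letter
    else false

def validate_course_name_input (P : String) : Bool :=
  if P = "" then true
  else pvLoopA P.toList false

-- ===== PORT B =====
-- LETTERS = set("abc…XYZ")
def pvLetters : PySem.Set Char :=
  PySem.Set.ofList "abcdefghijklmnopqrstuvwxyzABCDEFGHIJKLMNOPQRSTUVWXYZ".toList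
-- VALID_CHARS = LETTERS | set("0123456789-:_ ")
def pvValidChars : PySem.Set Char :=
  PySem.Set.union pvLetters (PySem.Set.ofList "0123456789-:_ ".toList)

def validate_course_name_input_alt (P : String) : Bool :=
  let distinct : PySem.Set Char := PySem.Set.ofList P.toList
  PySem.Set.issubset distinct pvValidChars
    && (P == "" || !PySem.Set.isdisjoint distinct pvLetters)

-- ===== PRECONDITION & SPEC =====
def Spec_validate_course_name_input (P : String) (out : Bool) : Prop := out = validate_course_name_input_alt P
instance (P : String) (out : Bool) : Decidable (Spec_validate_course_name_input P out) := by unfold Spec_validate_course_name_input; infer_instance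

-- ===== CLAIM (what is proved, stated in full; the proofs are below) =====
def Claim_equal_validate_course_name_input : Prop := ∀ (P : String), Dom_validate_course_name_input P → Spec_validate_course_name_input P (validate_course_name_input P)

-- ===== LEMMAS AND PROOFS =====
def pvValidA (c : Char) : Bool :=
  PySem.Str.isalpha c || PySem.Str.isdigit c || PySem.Set.contains pvAllowedA c

lemma pvLoopA_eq (cs : List Char) : ∀ (hl : Bool),
    pvLoopA cs hl = (cs.all pvValidA && (hl || cs.any PySem.Str.isalpha)) := by
  induction cs with
  | nil => intro hl; simp [pvLoopA]
  | cons c rest ih =>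
    intro hl
    cases ha : PySem.Str.isalpha c <;>
    cases hd : PySem.Str.isdigit c <;>
    cases hm : PySem.Set.contains pvAllowedA c <;>
      simp [pvLoopA, pvValidA, ha, hd, hm, ih, Bool.and_assoc]

set_option maxRecDepth 8192 in
lemma pvCharTable : ∀ n ∈ List.range 127,
    (PySem.Str.isalpha (Char.ofNat n) = decide (Char.ofNat n ∈ pvLetters)) ∧
    (pvValidA (Char.ofNat n) = decide (Char.ofNat n ∈ pvValidChars)) := by decide

lemma pvCharDom (c : Char) (h : pvDomChar c = true) :
    (PySem.Str.isalpha c = decide (c ∈ pvLetters)) ∧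
    (pvValidA c = decide (c ∈ pvValidChars)) := by
  have hlt : c.toNat < 127 := by
    have h' : ((32 ≤ c.toNat ∧ c.toNat ≤ 126 ∨ c.toNat = 9) ∨ c.toNat = 10) ∨ c.toNat = 13 := by
      simpa [pvDomChar] using h
    omega
  have := pvCharTable c.toNat (List.mem_range.mpr hlt)
  simpa [Char.ofNat_toNat] using this

-- ===== VERDICT (by name: the statement is the Claim_ definition above) =====
theorem validate_course_name_input_spec : Claim_equal_validate_course_name_input := by
  intro P hdom
  unfold Spec_validate_course_name_input validate_course_name_input validate_course_name_input_alt
  have hdom' : ∀ c ∈ P.toList, pvDomChar c = true := by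
    simpa [Dom_validate_course_name_input, pvDomStr, List.all_eq_true] using hdom
  by_cases h : P = ""
  · subst h; decide
  · rw [if_neg h, pvLoopA_eq]
    have hbe : (P == "") = false := by simpa using h
    rw [hbe]
    have hsub : P.toList.all pvValidA
        = PySem.Set.issubset (PySem.Set.ofList P.toList) pvValidChars := by
      rw [Bool.eq_iff_iff]
      simp only [List.all_eq_true, PySem.Set.issubset_iff, PySem.Set.mem_ofList]
      constructor
      · intro hall x hx
        have := hall x hx
        rw [(pvCharDom x (hdom' x hx)).2] at this
        exact of_decide_eq_true this
      · intro hall x hx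
        rw [(pvCharDom x (hdom' x hx)).2]
        exact decide_eq_true (hall x hx)
    have hany : P.toList.any PySem.Str.isalpha
        = !PySem.Set.isdisjoint (PySem.Set.ofList P.toList) pvLetters := by
      rw [Bool.eq_iff_iff]
      simp only [List.any_eq_true, Bool.not_eq_true', ← Bool.not_eq_true,
        PySem.Set.isdisjoint_iff, PySem.Set.mem_ofList]
      constructor
      · rintro ⟨x, hx, hax⟩ hdis
        rw [(pvCharDom x (hdom' x hx)).1] at hax
        exact hdis x hx (of_decide_eq_true hax)
      · intro hdis
        by_contra hno
        push Not at hno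
        apply hdis
        intro x hx hmem
        have := hno x hx
        rw [(pvCharDom x (hdom' x hx)).1] at this
        exact this (decide_eq_true hmem)
    rw [hsub, hany]
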